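-- pv_equiv track=rewrite | github.com/practise-123/MyCodes | algorithms/dummy.py | shift_matrix
-- ===== SOURCE A (Python) =====
-- def shift_matrix(matrix, direction):
--     if not matrix:
--         return []
--
--     num_rows, num_cols = len(matrix), len(matrix[0])
--
--     if direction == 'up':
--         for i in range(num_rows - 1):
--             for j in range(num_cols):
--                 matrix[i][j] = matrix[i + 1][j]
--         for j in range(num_cols):
--             matrix[num_rows - 1][j] = 0
--
--     elif direction == 'down':
--         for i in range(num_rows - 1, 0, -1):
--             for j in range(num_cols):
--                 matrix[i][j] = matrix[i - 1][j]
--         for j in range(num_cols):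
--             matrix[0][j] = 0
--
--     elif direction == 'left':
--         for i in range(num_rows):
--             for j in range(num_cols - 1):
--                 matrix[i][j] = matrix[i][j + 1]
--             matrix[i][num_cols - 1] = 0
--
--     elif direction == 'right':
--         for i in range(num_rows):
--             for j in range(num_cols - 1, 0, -1):
--                 matrix[i][j] = matrix[i][j - 1]
--             matrix[i][0] = 0
--
--     return matrix
-- ===== SOURCE B (Python) =====
-- def shift_matrix(matrix, direction):
--     if not matrix:
--         return []
--
--     num_cols = len(matrix[0])
--
--     if direction == 'up':
--         new_rows = [list(r) for r in matrix[1:]] + [[0] * num_cols]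
--     elif direction == 'down':
--         new_rows = [[0] * num_cols] + [list(r) for r in matrix[:-1]]
--     elif direction == 'left':
--         new_rows = [r[1:] + [0] for r in matrix]
--     elif direction == 'right':
--         new_rows = [[0] + r[:-1] for r in matrix]
--     else:
--         return matrix
--
--     for row, new in zip(matrix, new_rows):
--         row[:] = new
--     return matrix
-- ===== Notes on version B (the rewrite author's own statement) =====
-- stated objective: simpler
-- what changed: Replaces the element-wise nested index-shifting loops with whole-structure slicing: up/down rearrange the row list (matrix[1:]+[zeros] / [zeros]+matrix[:-1]), left/right rebuild each row by slicing (row[1:]+[0] / [0]+row[:-1]), then the values are written back with row[:] assignment to keep the in-place mutation of the argument's rows.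
-- outside the precondition, e.g. on shift_matrix([[1], [2, 3]], 'left'): A returns [[0], [0, 3]], B returns [[0], [3, 0]]
import Mathlib
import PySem

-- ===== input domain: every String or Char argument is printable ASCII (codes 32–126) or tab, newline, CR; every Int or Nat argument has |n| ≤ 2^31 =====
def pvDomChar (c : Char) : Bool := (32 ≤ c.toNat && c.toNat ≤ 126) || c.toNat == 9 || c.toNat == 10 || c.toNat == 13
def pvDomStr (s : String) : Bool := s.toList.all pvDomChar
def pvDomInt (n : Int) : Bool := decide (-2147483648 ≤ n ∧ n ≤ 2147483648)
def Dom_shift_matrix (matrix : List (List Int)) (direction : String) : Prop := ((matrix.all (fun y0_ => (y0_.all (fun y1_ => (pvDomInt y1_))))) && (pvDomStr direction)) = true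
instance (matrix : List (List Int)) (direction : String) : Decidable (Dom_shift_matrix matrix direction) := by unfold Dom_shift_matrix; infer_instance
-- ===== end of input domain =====

-- B replaces A's element-wise index-shifting loops by whole-structure slicing (same cost);
-- both A and B mutate the argument's rows in place in Python — the equivalence proved here is about the RETURN value.

-- ===== PORT A =====
-- matrix[i][j] read / write (indices are in range on every admitted input; out of range Python raises, excluded by Pre_)
def getCell (m : List (List Int)) (i j : Nat) : Int := (m.getD i []).getD j 0
def setCell (m : List (List Int)) (i j : Nat) (v : Int) : List (List Int) := m.set i ((m.getD i []).set j v)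

def shift_matrix (matrix : List (List Int)) (direction : String) : List (List Int) :=
  if matrix = [] then []
  else
    let numRows := matrix.length
    let numCols := (matrix.headD []).length
    if direction = "up" then
      let m1 := (List.range (numRows - 1)).foldl
        (fun m i => (List.range numCols).foldl (fun m j => setCell m i j (getCell m (i+1) j)) m) matrix
      (List.range numCols).foldl (fun m j => setCell m (numRows - 1) j 0) m1
    else if direction = "down" then
      -- range(num_rows-1, 0, -1) = [numRows-1, …, 1]
      let m1 := (((List.range (numRows - 1)).map (· + 1)).reverse).foldl
        (fun m i => (List.range numCols).foldl (fun m j => setCell m i j (getCell m (i-1) j)) m) matrix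
      (List.range numCols).foldl (fun m j => setCell m 0 j 0) m1
    else if direction = "left" then
      (List.range numRows).foldl
        (fun m i => setCell ((List.range (numCols - 1)).foldl
            (fun m j => setCell m i j (getCell m i (j+1))) m) i (numCols - 1) 0) matrix
    else if direction = "right" then
      -- range(num_cols-1, 0, -1) = [numCols-1, …, 1]
      (List.range numRows).foldl
        (fun m i => setCell ((((List.range (numCols - 1)).map (· + 1)).reverse).foldl
            (fun m j => setCell m i j (getCell m i (j-1))) m) i 0 0) matrix
    else matrix

-- ===== PORT B =====
-- Source B builds new_rows by slicing and writes it back into the argument's rows with row[:] = new;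
-- the returned value is exactly new_rows (new_rows always has matrix's length), ported directly.
def shift_matrix_alt (matrix : List (List Int)) (direction : String) : List (List Int) :=
  if matrix = [] then []
  else
    let numCols := (matrix.headD []).length
    if direction = "up" then matrix.drop 1 ++ [List.replicate numCols 0]
    else if direction = "down" then List.replicate numCols 0 :: matrix.dropLast
    else if direction = "left" then matrix.map (fun r => r.drop 1 ++ [0])
    else if direction = "right" then matrix.map (fun r => 0 :: r.dropLast)
    else matrix

-- ===== PRECONDITION & SPEC =====
-- Pre_ restricts recognised directions to well-formed (rectangular) matrices, the function's natural
-- domain: on ragged input A raises IndexError (rows shorter than row 0, or empty rows with left/right)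
-- or silently leaves the tails of rows longer than row 0 untouched, an artefact of indexing by
-- len(matrix[0]); unrecognised directions are unrestricted (A touches nothing).
def Pre_shift_matrix (matrix : List (List Int)) (direction : String) : Prop :=
  (direction = "up" ∨ direction = "down" ∨ direction = "left" ∨ direction = "right") →
    ((∀ r ∈ matrix, r.length = (matrix.headD []).length) ∧
     ((direction = "left" ∨ direction = "right") → matrix = [] ∨ matrix.headD [] ≠ []))
instance (matrix : List (List Int)) (direction : String) : Decidable (Pre_shift_matrix matrix direction) := by
  unfold Pre_shift_matrix; infer_instance

def pvWitness_shift_matrix : List (List Int) × String := ([[1, 2], [3, 4]], "up")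

def Spec_shift_matrix (matrix : List (List Int)) (direction : String) (out : List (List Int)) : Prop := out = shift_matrix_alt matrix direction
instance (matrix : List (List Int)) (direction : String) (out : List (List Int)) : Decidable (Spec_shift_matrix matrix direction out) := by unfold Spec_shift_matrix; infer_instance

-- ===== CLAIM (what is proved, stated in full; the proofs are below) =====
def Claim_equal_shift_matrix : Prop := ∀ (matrix : List (List Int)) (direction : String), Dom_shift_matrix matrix direction → Pre_shift_matrix matrix direction → Spec_shift_matrix matrix direction (shift_matrix matrix direction)

-- ===== LEMMAS AND PROOFS =====
theorem copy_fold {α : Type} (d : α) (s : List α) :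
    ∀ (k : Nat) (r : List α), k ≤ r.length → k ≤ s.length →
      (List.range k).foldl (fun r j => r.set j (s.getD j d)) r = s.take k ++ r.drop k := by
  intro k
  induction k with
  | zero => simp
  | succ k ih =>
    intro r hk hs
    rw [List.range_succ, List.foldl_append, ih r (by omega) (by omega)]
    simp only [List.foldl_cons, List.foldl_nil]
    rw [List.set_append_right _ _ (by simp [Nat.min_eq_left (show k ≤ s.length by omega)]),
        List.getD_eq_getElem?_getD, List.getElem?_eq_getElem (by omega : k < s.length)]
    simp [Nat.min_eq_left (show k ≤ s.length by omega)]
    rw [List.drop_eq_getElem_cons (show k < r.length by omega), List.set_cons_zero,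
        List.take_add_one, List.getElem?_eq_getElem (show k < s.length by omega)]
    simp only [Option.toList_some, List.append_assoc, List.singleton_append]
theorem const_fold {α : Type} (v : α) :
    ∀ (k : Nat) (r : List α), k ≤ r.length →
      (List.range k).foldl (fun r j => r.set j v) r = List.replicate k v ++ r.drop k := by
  intro k
  induction k with
  | zero => simp
  | succ k ih =>
    intro r hk
    rw [List.range_succ, List.foldl_append, ih r (by omega)]
    simp only [List.foldl_cons, List.foldl_nil]
    rw [List.set_append_right _ _ (by simp)]
    simp only [List.length_replicate, Nat.sub_self]
    rw [List.drop_eq_getElem_cons (show k < r.length by omega), List.set_cons_zero,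
        List.replicate_succ' (n := k)]
    simp only [List.append_assoc, List.singleton_append]
theorem step_eq {α : Type} (r : List α) (k : Nat) (h : k + 1 < r.length) :
    (r.drop 1).take k ++ (r.drop k).set 0 r[k+1] = (r.drop 1).take (k+1) ++ r.drop (k+1) := by
  rw [List.drop_eq_getElem_cons (show k < r.length by omega), List.set_cons_zero,
      List.take_add_one, List.getElem?_eq_getElem (l := r.drop 1) (by simp; omega)]
  rw [List.getElem_drop]
  simp only [Option.toList_some, List.append_assoc, List.singleton_append]
  simp only [Nat.add_comm 1 k]
theorem shiftL_fold {α : Type} (d : α) :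
    ∀ (k : Nat) (r : List α), k + 1 ≤ r.length →
      (List.range k).foldl (fun r j => r.set j (r.getD (j+1) d)) r
        = (r.drop 1).take k ++ r.drop k := by
  intro k
  induction k with
  | zero => simp
  | succ k ih =>
    intro r hk
    rw [List.range_succ, List.foldl_append, ih r (by omega)]
    simp only [List.foldl_cons, List.foldl_nil]
    have hlen : ((r.drop 1).take k).length = k := by simp; omega
    rw [List.getD_eq_getElem?_getD, List.getElem?_append_right (by omega), hlen,
        List.getElem?_drop, show k + (k + 1 - k) = k + 1 from by omega,
        List.getElem?_eq_getElem (show k + 1 < r.length by omega)]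
    simp only [Option.getD_some]
    rw [List.set_append_right _ _ (by omega), hlen, Nat.sub_self]
    exact step_eq r k (by omega)
theorem desc_cons (k : Nat) :
    ((List.range (k+1)).map (· + 1)).reverse = (k+1) :: ((List.range k).map (· + 1)).reverse := by
  rw [List.range_succ]
  simp
theorem shiftR_fold {α : Type} (d : α) :
    ∀ (k : Nat) (r : List α), k + 1 ≤ r.length →
      (((List.range k).map (· + 1)).reverse).foldl (fun r j => r.set j (r.getD (j-1) d)) r
        = r.take 1 ++ r.take k ++ r.drop (k+1) := by
  intro k
  induction k with
  | zero =>
    intro r hr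
    simp only [List.range_zero, List.map_nil, List.reverse_nil, List.foldl_nil,
      Nat.zero_add, List.take_zero, List.append_nil]
    rw [List.take_append_drop]
  | succ k ih =>
    intro r hk
    rw [desc_cons, List.foldl_cons]
    have hget : r.getD (k + 1 - 1) d = r[k] := by
      rw [show k + 1 - 1 = k from rfl, List.getD_eq_getElem?_getD,
          List.getElem?_eq_getElem (show k < r.length by omega), Option.getD_some]
    rw [hget, ih (r.set (k+1) r[k]) (by simp; omega)]
    rw [List.take_set, List.set_eq_of_length_le (by simp),
        List.take_set, List.set_eq_of_length_le (by simp)]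
    rw [List.drop_set, if_neg (lt_irrefl _), Nat.sub_self,
        List.drop_eq_getElem_cons (show k + 1 < r.length by omega), List.set_cons_zero,
        List.take_add_one (i := k), List.getElem?_eq_getElem (show k < r.length by omega)]
    simp only [Option.toList_some, List.append_assoc, List.singleton_append]
theorem getD_set_self {α : Type} (l : List α) (i : Nat) (v d : α) (h : i < l.length) :
    (l.set i v).getD i d = v := by
  simp [List.getD_eq_getElem?_getD, h]
theorem getD_set_ne {α : Type} (l : List α) (i j : Nat) (v d : α) (h : i ≠ j) :
    (l.set i v).getD j d = l.getD j d := by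
  simp [List.getD_eq_getElem?_getD, List.getElem?_set_ne h]
theorem set_getD_self {α : Type} (l : List α) (i : Nat) (d : α) (h : i < l.length) :
    l.set i (l.getD i d) = l := by
  rw [List.getD_eq_getElem?_getD, List.getElem?_eq_getElem h]
  simp

theorem inner_self (i : Nat) (F : List Int → Nat → Int) :
    ∀ (js : List Nat) (m : List (List Int)) (r : List Int), i < m.length → m.getD i [] = r →
      js.foldl (fun m j => setCell m i j (F (m.getD i []) j)) m
        = m.set i (js.foldl (fun r j => r.set j (F r j)) r) := by
  intro js
  induction js with
  | nil =>
    intro m r hi hr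
    simp only [List.foldl_nil]
    rw [← hr, set_getD_self _ _ _ hi]
  | cons j js ih =>
    intro m r hi hr
    simp only [List.foldl_cons]
    have hstep : setCell m i j (F (m.getD i []) j) = m.set i (r.set j (F r j)) := by
      rw [setCell, hr]
    rw [hstep, ih (m.set i (r.set j (F r j))) (r.set j (F r j))
          (by simp [hi]) (getD_set_self _ _ _ _ hi), List.set_set]

theorem inner_other (i i' : Nat) (hne : i' ≠ i) :
    ∀ (js : List Nat) (m : List (List Int)) (r s : List Int), i < m.length →
      m.getD i [] = r → m.getD i' [] = s →
      js.foldl (fun m j => setCell m i j (getCell m i' j)) m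
        = m.set i (js.foldl (fun r j => r.set j (s.getD j 0)) r) := by
  intro js
  induction js with
  | nil =>
    intro m r s hi hr hs
    simp only [List.foldl_nil]
    rw [← hr, set_getD_self _ _ _ hi]
  | cons j js ih =>
    intro m r s hi hr hs
    simp only [List.foldl_cons]
    have hstep : setCell m i j (getCell m i' j) = m.set i (r.set j (s.getD j 0)) := by
      rw [setCell, getCell, hr, hs]
    rw [hstep, ih (m.set i (r.set j (s.getD j 0))) (r.set j (s.getD j 0)) s
          (by simp [hi]) (getD_set_self _ _ _ _ hi)
          (by rw [getD_set_ne _ _ _ _ _ (fun h => hne h.symm), hs]), List.set_set]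

theorem outer_map (g : List Int → List Int) (step : List (List Int) → Nat → List (List Int))
    (hstep : ∀ (m : List (List Int)) (i : Nat), i < m.length → step m i = m.set i (g (m.getD i []))) :
    ∀ (k : Nat) (m : List (List Int)), k ≤ m.length →
      (List.range k).foldl step m = (m.take k).map g ++ m.drop k := by
  intro k
  induction k with
  | zero => simp
  | succ k ih =>
    intro m hk
    rw [List.range_succ, List.foldl_append, ih m (by omega)]
    simp only [List.foldl_cons, List.foldl_nil]
    have hlen : (((m.take k).map g)).length = k := by simp; omega
    rw [hstep _ k (by simp; omega)]
    rw [List.getD_eq_getElem?_getD, List.getElem?_append_right (by omega), hlen, Nat.sub_self,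
        List.getElem?_drop, Nat.add_zero, List.getElem?_eq_getElem (show k < m.length by omega),
        Option.getD_some]
    rw [List.set_append_right _ _ (by omega), hlen, Nat.sub_self,
        List.drop_eq_getElem_cons (show k < m.length by omega), List.set_cons_zero,
        List.take_add_one, List.getElem?_eq_getElem (show k < m.length by omega)]
    simp only [Option.toList_some, List.map_append, List.map_cons, List.map_nil,
      List.append_assoc, List.cons_append, List.nil_append]

theorem up_fold (c : Nat) :
    ∀ (k : Nat) (m : List (List Int)), k + 1 ≤ m.length → (∀ r ∈ m, r.length = c) →
      (List.range k).foldl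
          (fun m i => (List.range c).foldl (fun m j => setCell m i j (getCell m (i+1) j)) m) m
        = (m.drop 1).take k ++ m.drop k := by
  intro k
  induction k with
  | zero => simp
  | succ k ih =>
    intro m hk hrect
    rw [List.range_succ, List.foldl_append, ih m (by omega) hrect]
    simp only [List.foldl_cons, List.foldl_nil]
    set s : List (List Int) := (m.drop 1).take k ++ m.drop k with hs
    have hlen1 : ((m.drop 1).take k).length = k := by simp; omega
    have hslen : s.length = m.length := by simp [hs]; omega
    have hgetk : s.getD k [] = m[k] := by
      rw [List.getD_eq_getElem?_getD, List.getElem?_append_right (by omega), hlen1, Nat.sub_self,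
          List.getElem?_drop, Nat.add_zero, List.getElem?_eq_getElem (show k < m.length by omega),
          Option.getD_some]
    have hgetk1 : s.getD (k+1) [] = m[k+1] := by
      rw [List.getD_eq_getElem?_getD, List.getElem?_append_right (by omega), hlen1,
          List.getElem?_drop, show k + (k + 1 - k) = k + 1 from by omega,
          List.getElem?_eq_getElem (show k + 1 < m.length by omega)]
      rfl
    rw [inner_other k (k+1) (by omega) (List.range c) s m[k] m[k+1]
          (by omega) hgetk hgetk1]
    have hlk : (m[k] : List Int).length = c := hrect _ (List.getElem_mem _)
    have hlk1 : (m[k+1] : List Int).length = c := hrect _ (List.getElem_mem _)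
    simp only [copy_fold 0 m[k+1] c m[k] (by omega) (by omega)]
    rw [List.take_of_length_le (by omega), ← hlk, List.drop_length, List.append_nil]
    rw [hs, List.set_append_right _ _ (by omega), hlen1, Nat.sub_self]
    exact step_eq m k (by omega)

theorem down_fold (c : Nat) :
    ∀ (k : Nat) (m : List (List Int)), k + 1 ≤ m.length → (∀ r ∈ m, r.length = c) →
      (((List.range k).map (· + 1)).reverse).foldl
          (fun m i => (List.range c).foldl (fun m j => setCell m i j (getCell m (i-1) j)) m) m
        = m.take 1 ++ m.take k ++ m.drop (k+1) := by
  intro k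
  induction k with
  | zero =>
    intro m hk _
    simp only [List.range_zero, List.map_nil, List.reverse_nil, List.foldl_nil,
      Nat.zero_add, List.take_zero, List.append_nil]
    rw [List.take_append_drop]
  | succ k ih =>
    intro m hk hrect
    rw [desc_cons, List.foldl_cons]
    have hget : m.getD (k+1) [] = m[k+1] := by
      rw [List.getD_eq_getElem?_getD, List.getElem?_eq_getElem (show k + 1 < m.length by omega)]
      rfl
    have hgetk : m.getD k [] = m[k] := by
      rw [List.getD_eq_getElem?_getD, List.getElem?_eq_getElem (show k < m.length by omega)]
      rfl
    have hstep : (List.range c).foldl (fun m j => setCell m (k+1) j (getCell m (k+1-1) j)) m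
        = m.set (k+1) m[k] := by
      have h1 : k + 1 - 1 = k := rfl
      rw [show (fun (m : List (List Int)) (j : Nat) => setCell m (k+1) j (getCell m (k+1-1) j))
            = (fun m j => setCell m (k+1) j (getCell m k j)) from by simp [h1]]
      rw [inner_other (k+1) k (by omega) (List.range c) m m[k+1] m[k] (by omega) hget hgetk]
      have hlk : (m[k] : List Int).length = c := hrect _ (List.getElem_mem _)
      have hlk1 : (m[k+1] : List Int).length = c := hrect _ (List.getElem_mem _)
      simp only [copy_fold 0 m[k] c m[k+1] (by omega) (by omega)]
      rw [List.take_of_length_le (by omega), ← hlk1, List.drop_length, List.append_nil]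
    rw [hstep, ih (m.set (k+1) m[k]) (by simp; omega)
          (by intro r hr
              rcases List.mem_or_eq_of_mem_set hr with h | h
              · exact hrect _ h
              · rw [h]; exact hrect _ (List.getElem_mem _))]
    rw [List.take_set, List.set_eq_of_length_le (by simp),
        List.take_set, List.set_eq_of_length_le (by simp)]
    rw [List.drop_set, if_neg (lt_irrefl _), Nat.sub_self,
        List.drop_eq_getElem_cons (show k + 1 < m.length by omega), List.set_cons_zero,
        List.take_add_one (i := k), List.getElem?_eq_getElem (show k < m.length by omega)]
    simp only [Option.toList_some, List.append_assoc, List.singleton_append]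

theorem up_case (a : List Int) (t : List (List Int)) (c : Nat)
    (hrect : ∀ r ∈ (a :: t), r.length = c) :
    (List.range c).foldl (fun m j => setCell m ((a :: t).length - 1) j 0)
      ((List.range ((a :: t).length - 1)).foldl
        (fun m i => (List.range c).foldl (fun m j => setCell m i j (getCell m (i+1) j)) m) (a :: t))
      = t ++ [List.replicate c 0] := by
  simp only [List.length_cons, Nat.add_sub_cancel]
  rw [up_fold c (t.length) (a :: t) (by simp) hrect]
  -- m1 = ((a::t).drop 1).take t.length ++ (a::t).drop t.length
  rw [List.drop_one, List.tail_cons, List.take_of_length_le (le_refl _),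
      List.drop_eq_getElem_cons (show t.length < (a :: t).length by simp),
      List.drop_eq_nil_of_le (by simp)]
  -- zero-fill row t.length of t ++ [(a::t)[t.length]]
  rw [show (fun (m : List (List Int)) (j : Nat) => setCell m t.length j 0)
        = (fun m j => setCell m t.length j ((fun (_ : List Int) (_ : Nat) => (0:Int)) (m.getD t.length []) j)) from rfl]
  rw [inner_self t.length (fun _ _ => (0:Int)) (List.range c) _ ((a :: t)[t.length])
        (by simp) (by rw [List.getD_eq_getElem?_getD, List.getElem?_append_right (le_refl _), Nat.sub_self]; rfl)]
  rw [show (fun (r : List Int) (j : Nat) => r.set j ((fun (_ : List Int) (_ : Nat) => (0:Int)) r j))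
        = (fun (r : List Int) (j : Nat) => r.set j 0) from rfl]
  have hrc : ((a :: t)[t.length] : List Int).length = c := hrect _ (List.getElem_mem _)
  rw [const_fold (0:Int) c _ (by omega), ← hrc, List.drop_length, List.append_nil]
  rw [List.set_append_right _ _ (le_refl _), Nat.sub_self, List.set_cons_zero]

theorem down_case (a : List Int) (t : List (List Int)) (c : Nat)
    (hrect : ∀ r ∈ (a :: t), r.length = c) :
    (List.range c).foldl (fun m j => setCell m 0 j 0)
      ((((List.range ((a :: t).length - 1)).map (· + 1)).reverse).foldl
        (fun m i => (List.range c).foldl (fun m j => setCell m i j (getCell m (i-1) j)) m) (a :: t))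
      = List.replicate c 0 :: (a :: t).dropLast := by
  simp only [List.length_cons, Nat.add_sub_cancel]
  rw [down_fold c (t.length) (a :: t) (by simp) hrect,
      List.drop_eq_nil_of_le (by simp), List.append_nil,
      show (a :: t).take 1 = [a] from rfl, List.singleton_append]
  rw [show (fun (m : List (List Int)) (j : Nat) => setCell m 0 j 0)
        = (fun m j => setCell m 0 j ((fun (_ : List Int) (_ : Nat) => (0:Int)) (m.getD 0 []) j)) from rfl]
  rw [inner_self 0 (fun _ _ => (0:Int)) (List.range c) _ a (by simp) (List.getD_cons_zero)]
  rw [show (fun (r : List Int) (j : Nat) => r.set j ((fun (_ : List Int) (_ : Nat) => (0:Int)) r j))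
        = (fun (r : List Int) (j : Nat) => r.set j 0) from rfl]
  have ha : a.length = c := hrect a List.mem_cons_self
  rw [const_fold (0:Int) c a (by omega), ← ha, List.drop_length, List.append_nil, List.set_cons_zero]
  rw [show (a :: t).dropLast = (a :: t).take t.length from by rw [List.dropLast_eq_take]; simp]

theorem left_case (matrix : List (List Int)) (c : Nat) (hc : 1 ≤ c)
    (hrect : ∀ r ∈ matrix, r.length = c) :
    (List.range matrix.length).foldl
      (fun m i => setCell ((List.range (c - 1)).foldl
          (fun m j => setCell m i j (getCell m i (j+1))) m) i (c - 1) 0) matrix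
      = matrix.map (fun r => r.drop 1 ++ [0]) := by
  rw [outer_map (fun r => ((List.range (c-1)).foldl (fun r j => r.set j (r.getD (j+1) 0)) r).set (c-1) 0)
        _ ?hstep matrix.length matrix (le_refl _),
      List.take_length, List.drop_length, List.append_nil]
  case hstep =>
    intro m i hi
    rw [show (fun (m : List (List Int)) (j : Nat) => setCell m i j (getCell m i (j+1)))
          = (fun m j => setCell m i j ((fun (r : List Int) (j : Nat) => r.getD (j+1) 0) (m.getD i []) j)) from rfl]
    rw [inner_self i (fun (r : List Int) (j : Nat) => r.getD (j+1) 0) (List.range (c-1)) m (m.getD i []) hi rfl]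
    rw [setCell, getD_set_self _ _ _ _ (by simpa using hi), List.set_set]
  refine List.map_congr_left (fun r hr => ?_)
  have hrc : r.length = c := hrect r hr
  have h1 : (r.drop 1).length = c - 1 := by simp [hrc]
  rw [shiftL_fold 0 (c-1) r (by omega)]
  rw [List.take_of_length_le (le_of_eq h1),
      List.drop_eq_getElem_cons (show c - 1 < r.length by omega),
      List.drop_eq_nil_of_le (show r.length ≤ c - 1 + 1 by omega)]
  rw [List.set_append_right _ _ (le_of_eq h1), h1, Nat.sub_self, List.set_cons_zero]

theorem right_case (matrix : List (List Int)) (c : Nat) (hc : 1 ≤ c)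
    (hrect : ∀ r ∈ matrix, r.length = c) :
    (List.range matrix.length).foldl
      (fun m i => setCell ((((List.range (c - 1)).map (· + 1)).reverse).foldl
          (fun m j => setCell m i j (getCell m i (j-1))) m) i 0 0) matrix
      = matrix.map (fun r => 0 :: r.dropLast) := by
  rw [outer_map (fun r => ((((List.range (c-1)).map (· + 1)).reverse).foldl (fun r j => r.set j (r.getD (j-1) 0)) r).set 0 0)
        _ ?hstep matrix.length matrix (le_refl _),
      List.take_length, List.drop_length, List.append_nil]
  case hstep =>
    intro m i hi
    rw [show (fun (m : List (List Int)) (j : Nat) => setCell m i j (getCell m i (j-1)))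
          = (fun m j => setCell m i j ((fun (r : List Int) (j : Nat) => r.getD (j-1) 0) (m.getD i []) j)) from rfl]
    rw [inner_self i (fun (r : List Int) (j : Nat) => r.getD (j-1) 0) (((List.range (c-1)).map (· + 1)).reverse) m (m.getD i []) hi rfl]
    rw [setCell, getD_set_self _ _ _ _ (by simpa using hi), List.set_set]
  refine List.map_congr_left (fun r hr => ?_)
  have hrc : r.length = c := hrect r hr
  rw [shiftR_fold 0 (c-1) r (by omega), List.drop_eq_nil_of_le (show r.length ≤ c - 1 + 1 by omega), List.append_nil]
  cases r with
  | nil => simp at hrc; omega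
  | cons b s =>
    have hs : c - 1 = s.length := by simp at hrc; omega
    rw [show (b :: s).take 1 = [b] from rfl, List.singleton_append, List.set_cons_zero, hs,
        show (b :: s).take s.length = (b :: s).dropLast from by rw [List.dropLast_eq_take]; simp]

-- ===== VERDICT (by name: the statement is the Claim_ definition above) =====
theorem shift_matrix_spec : Claim_equal_shift_matrix := by
  intro matrix direction _ hpre
  unfold Spec_shift_matrix
  cases matrix with
  | nil => simp [shift_matrix, shift_matrix_alt]
  | cons a t =>
    by_cases hup : direction = "up"
    · subst hup
      obtain ⟨hrect, -⟩ := hpre (Or.inl rfl)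
      simp only [List.headD_cons] at hrect
      simp only [shift_matrix, shift_matrix_alt, if_neg (List.cons_ne_nil a t),
        List.headD_cons, List.drop_one, List.tail_cons]
      exact up_case a t a.length hrect
    · by_cases hdown : direction = "down"
      · subst hdown
        obtain ⟨hrect, -⟩ := hpre (Or.inr (Or.inl rfl))
        simp only [List.headD_cons] at hrect
        simp only [shift_matrix, shift_matrix_alt, if_neg (List.cons_ne_nil a t),
          if_neg (by decide : ¬ ("down" : String) = "up"), List.headD_cons]
        exact down_case a t a.length hrect
      · by_cases hleft : direction = "left"
        · subst hleft
          obtain ⟨hrect, hne⟩ := hpre (Or.inr (Or.inr (Or.inl rfl)))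
          simp only [List.headD_cons] at hrect
          have ha : a ≠ [] := by
            rcases hne (Or.inl rfl) with h | h
            · exact absurd h (List.cons_ne_nil a t)
            · simpa using h
          have hc : 1 ≤ a.length := List.length_pos_of_ne_nil ha
          simp only [shift_matrix, shift_matrix_alt, if_neg (List.cons_ne_nil a t),
            if_neg (by decide : ¬ ("left" : String) = "up"),
            if_neg (by decide : ¬ ("left" : String) = "down"), List.headD_cons]
          exact left_case (a :: t) a.length hc hrect
        · by_cases hright : direction = "right"
          · subst hright
            obtain ⟨hrect, hne⟩ := hpre (Or.inr (Or.inr (Or.inr rfl)))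
            simp only [List.headD_cons] at hrect
            have ha : a ≠ [] := by
              rcases hne (Or.inr rfl) with h | h
              · exact absurd h (List.cons_ne_nil a t)
              · simpa using h
            have hc : 1 ≤ a.length := List.length_pos_of_ne_nil ha
            simp only [shift_matrix, shift_matrix_alt, if_neg (List.cons_ne_nil a t),
              if_neg (by decide : ¬ ("right" : String) = "up"),
              if_neg (by decide : ¬ ("right" : String) = "down"),
              if_neg (by decide : ¬ ("right" : String) = "left"), List.headD_cons]
            exact right_case (a :: t) a.length hc hrect
          · simp only [shift_matrix, shift_matrix_alt, if_neg (List.cons_ne_nil a t),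
              if_neg hup, if_neg hdown, if_neg hleft, if_neg hright]
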